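-- pv_equiv track=rewrite | github.com/adamwangdata/adamwangdata.github.io | python-examples/p54.py | is_n_of_a_kind
-- ===== SOURCE A (Python) =====
-- def is_n_of_a_kind(vals, n):
--     """Check if hand has n of a kind."""
--     unique_vals = set(vals)
--     for unique_val in unique_vals:
--         count = 0
--         for val in vals:
--             if unique_val == val:
--                 count += 1
--         if count == n:
--             return True
--     return False
-- ===== SOURCE B (Python) =====
-- def is_n_of_a_kind(vals, n):
--     """Check if hand has n of a kind."""
--     counts = {}
--     for val in vals:
--         counts[val] = counts.get(val, 0) + 1
--     return n in counts.values()
-- ===== Notes on version B (the rewrite author's own statement) =====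
-- stated objective: faster
-- what changed: Replaces the unique-values outer loop with an inner rescan of vals (O(u*m)) by a single counting pass into a dict followed by a membership test on its values (O(m)).
import Mathlib
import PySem

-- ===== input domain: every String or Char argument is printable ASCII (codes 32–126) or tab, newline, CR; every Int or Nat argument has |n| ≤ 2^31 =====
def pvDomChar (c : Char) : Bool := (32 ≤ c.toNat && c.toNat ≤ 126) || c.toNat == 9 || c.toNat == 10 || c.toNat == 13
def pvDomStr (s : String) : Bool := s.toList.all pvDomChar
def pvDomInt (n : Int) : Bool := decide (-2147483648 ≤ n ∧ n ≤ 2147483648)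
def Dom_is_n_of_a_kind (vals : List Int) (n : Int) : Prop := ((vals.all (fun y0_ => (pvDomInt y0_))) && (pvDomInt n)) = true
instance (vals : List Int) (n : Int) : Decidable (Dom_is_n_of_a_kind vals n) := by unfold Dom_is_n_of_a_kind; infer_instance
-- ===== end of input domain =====

-- B replaces A's per-unique-value rescan of vals by one counting pass into a dict plus a membership test on its values (objective: faster; measured).


-- ===== PORT A =====
-- unique_vals = set(vals); for unique_val in unique_vals: count inner loop; early return True
-- (the set's hash iteration order does not affect the any-style result)
def pvALoop (vals : List Int) (n : Int) : List Int → Bool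
  | [] => false
  | u :: rest =>
      if (vals.foldl (fun count v => if u == v then count + 1 else count) (0 : Int)) == n then true
      else pvALoop vals n rest

def is_n_of_a_kind (vals : List Int) (n : Int) : Bool :=
  pvALoop vals n (PySem.Set.ofList vals)

-- ===== PORT B =====
def is_n_of_a_kind_alt (vals : List Int) (n : Int) : Bool :=
  let counts := vals.foldl (fun d v => PySem.Dict.modify d v 0 (· + 1)) (PySem.Dict.empty : PySem.Dict Int Int)
  (PySem.Dict.values counts).contains n

-- ===== PRECONDITION & SPEC =====
def Spec_is_n_of_a_kind (vals : List Int) (n : Int) (out : Bool) : Prop := out = is_n_of_a_kind_alt vals n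
instance (vals : List Int) (n : Int) (out : Bool) : Decidable (Spec_is_n_of_a_kind vals n out) := by unfold Spec_is_n_of_a_kind; infer_instance

-- ===== CLAIM (what is proved, stated in full; the proofs are below) =====
def Claim_equal_is_n_of_a_kind : Prop := ∀ (vals : List Int) (n : Int), Dom_is_n_of_a_kind vals n → Spec_is_n_of_a_kind vals n (is_n_of_a_kind vals n)

-- ===== LEMMAS AND PROOFS =====

-- ===== VERDICT (by name: the statement is the Claim_ definition above) =====
theorem pvALoop_eq_any (vals : List Int) (n : Int) (us : List Int) :
    pvALoop vals n us = us.any (fun u => (vals.count u : Int) == n) := by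
  induction us with
  | nil => rfl
  | cons u rest ih =>
      have hc : vals.foldl (fun count v => if u == v then count + 1 else count) (0 : Int)
          = (vals.count u : Int) := by
        have hswap : (fun (count v : Int) => if u == v then count + 1 else count)
            = (fun count v => if v == u then count + 1 else count) := by
          funext c v; rw [Bool.beq_comm]
        rw [hswap]
        simpa using PySem.List.foldl_beq_add_one (l := vals) (v := u) (a := (0 : Int))
      rw [pvALoop, hc, ih]
      cases h : ((vals.count u : Int) == n) <;> simp [h]

theorem is_n_of_a_kind_spec : Claim_equal_is_n_of_a_kind := by
  intro vals n _
  unfold Spec_is_n_of_a_kind is_n_of_a_kind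
  rw [pvALoop_eq_any]
  show _ = ((PySem.Dict.counter vals).items.map (·.2)).contains n
  rw [PySem.Dict.items_counter]
  induction (PySem.Set.ofList vals) with
  | nil => rfl
  | cons u rest ih =>
      simp only [List.any_cons, List.map_cons, List.contains_cons, ih]
      rw [Bool.beq_comm]
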